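-- pv_equiv track=rewrite | github.com/vamsiraju22/Python | DB Converter/Convert $$ to Executable.py | func
-- ===== SOURCE A (Python) =====
-- def func(s,t):
--     import re
--     table_list = re.findall(r'\$\$\w+\.\w+', s)
--     set_table = set(table_list)
--
--     db_tags = ["$$SLSORDVWDB", "$$STGDB", "$$COMREFVWDB", "$$ETLVWDB", "$$SLSORDDB", "$$ETLONLYDB","$$COMREFDB","$$WORKDB","$$EXCEPDB","$$FINLGLVWDB","$$NRTNCRVWDB","$$slsordvwdb"]
--
--     ts1_tags = ["SLSORDVWDB_TS1", "STGDB_TS1", "COMREFVWDB_TS1", "ETLVWDB_TS1", "SLSORDDB_TS1", "ETLONLYDB_TS1","COMREFDB_TS1","WORKDB_TS1","EXCEPDB_TS1","FINLGLVWDB_TS1","NRTNCRVWDB_TS1","slsordvwdb_ts1"]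
--
--     ts3_tags = ["SLSORDVWDB_TS3", "STGDB_TS3", "COMREFVWDB_TS3", "ETLVWDB_TS3", "SLSORDDB_TS3", "ETLONLYDB_TS3","COMREFDB_TS3","WORKDB_TS3","EXCEPDB_TS3","FINLGLVWDB_TS3","NRTNCRVWDB_TS3","slsordvwdb_ts3"]
--
--     dv3_tags = ["SLSORDVWDB_DV3", "STGDB_DV3", "COMREFVWDB_DV3", "ETLVWDB_DV3", "SLSORDDB_DV3", "ETLONLYDB_DV3","COMREFDB_DV3","WORKDB_DV3","EXCEPDB_DV3","FINLGLVWDB_DV3","NRTNCRVWDB_DV3","slsordvwdb_dv3"]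
--
--     tag=[]
--     if t==1:
--         tag=ts1_tags
--     if t==3:
--         tag=ts3_tags
--     if t==2:
--         tag=dv3_tags
--     for ind, i in enumerate(db_tags):
--         str = s.replace(db_tags[ind], tag[ind])
--         s = str
--     return (str)
-- ===== SOURCE B (Python) =====
-- # Single table-driven pass: build a tag->replacement mapping (index-based, so an
-- # invalid t raises IndexError exactly like A), then one regex substitution.
-- import re
--
-- def func(s, t):
--     db_tags = ["$$SLSORDVWDB", "$$STGDB", "$$COMREFVWDB", "$$ETLVWDB", "$$SLSORDDB", "$$ETLONLYDB","$$COMREFDB","$$WORKDB","$$EXCEPDB","$$FINLGLVWDB","$$NRTNCRVWDB","$$slsordvwdb"]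
--     envs = {1: "TS1", 2: "DV3", 3: "TS3"}
--     tags = [name[2:] + "_" + (envs[t] if name[2].isupper() else envs[t].lower())
--             for name in db_tags] if t in envs else []
--     mapping = {db_tags[i]: tags[i] for i in range(len(db_tags))}
--     pattern = re.compile("|".join(re.escape(d) for d in db_tags))
--     return pattern.sub(lambda m: mapping[m.group()], s)
-- ===== Notes on version B (the rewrite author's own statement) =====
-- stated objective: idiomatic
-- what changed: A makes 12 sequential full-string str.replace passes (one per DB tag); B builds a tag-to-replacement mapping once and performs a single left-to-right pass via one compiled alternation-regex re.sub, also dropping A's unused re.findall/set_table dead code.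
import Mathlib
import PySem

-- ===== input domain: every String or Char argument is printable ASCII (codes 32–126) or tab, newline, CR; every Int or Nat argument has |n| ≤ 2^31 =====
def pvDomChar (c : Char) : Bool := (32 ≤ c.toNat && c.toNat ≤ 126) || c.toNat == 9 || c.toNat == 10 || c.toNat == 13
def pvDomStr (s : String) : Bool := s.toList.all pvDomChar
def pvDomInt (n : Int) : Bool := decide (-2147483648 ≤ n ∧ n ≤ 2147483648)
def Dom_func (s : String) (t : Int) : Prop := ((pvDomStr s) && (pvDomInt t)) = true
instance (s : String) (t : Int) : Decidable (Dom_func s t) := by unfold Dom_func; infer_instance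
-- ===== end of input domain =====

-- B replaces A's 12 sequential full-string replace passes by one table-driven left-to-right pass
-- (a single alternation-regex substitution); objective: idiomatic single pass.

-- ===== PORT A =====

-- \w of r'\$\$\w+\.\w+' (ASCII domain): letters, digits, underscore
def pvIsWordChar (c : Char) : Bool := PySem.Chars.isalnum c || c == '_'

-- match r'\$\$\w+\.\w+' at the head of the list; returns (matched text, rest after the match).
-- Exact for this pattern on the ASCII domain: the greedy \w+ never backtracks since '.' is not a \w character.
def pvMatchTable (l : List Char) : Option (List Char × List Char) :=
  match l with
  | '$' :: '$' :: r =>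
    let a := r.takeWhile pvIsWordChar
    if a.isEmpty then none
    else
      match r.drop a.length with
      | '.' :: r2 =>
        let b := r2.takeWhile pvIsWordChar
        if b.isEmpty then none
        else some ('$' :: '$' :: a ++ '.' :: b, r2.drop b.length)
      | _ => none
  | _ => none

-- re.findall(r'\$\$\w+\.\w+', s): non-overlapping leftmost matches, scanning left to right
def pvFindTables : List Char → List String
  | [] => []
  | c :: cs =>
    match pvMatchTable (c :: cs) with
    | some (m, _) => String.ofList m :: pvFindTables (cs.drop (m.length - 1))
    | none => pvFindTables cs
termination_by cs => cs.length
decreasing_by all_goals (simp; try omega)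

def func (s : String) (t : Int) : String :=
  let table_list : List String := pvFindTables s.toList
  let set_table : PySem.Set String := PySem.Set.ofList table_list
  let db_tags : List String := ["$$SLSORDVWDB", "$$STGDB", "$$COMREFVWDB", "$$ETLVWDB", "$$SLSORDDB", "$$ETLONLYDB","$$COMREFDB","$$WORKDB","$$EXCEPDB","$$FINLGLVWDB","$$NRTNCRVWDB","$$slsordvwdb"]
  let ts1_tags : List String := ["SLSORDVWDB_TS1", "STGDB_TS1", "COMREFVWDB_TS1", "ETLVWDB_TS1", "SLSORDDB_TS1", "ETLONLYDB_TS1","COMREFDB_TS1","WORKDB_TS1","EXCEPDB_TS1","FINLGLVWDB_TS1","NRTNCRVWDB_TS1","slsordvwdb_ts1"]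
  let ts3_tags : List String := ["SLSORDVWDB_TS3", "STGDB_TS3", "COMREFVWDB_TS3", "ETLVWDB_TS3", "SLSORDDB_TS3", "ETLONLYDB_TS3","COMREFDB_TS3","WORKDB_TS3","EXCEPDB_TS3","FINLGLVWDB_TS3","NRTNCRVWDB_TS3","slsordvwdb_ts3"]
  let dv3_tags : List String := ["SLSORDVWDB_DV3", "STGDB_DV3", "COMREFVWDB_DV3", "ETLVWDB_DV3", "SLSORDDB_DV3", "ETLONLYDB_DV3","COMREFDB_DV3","WORKDB_DV3","EXCEPDB_DV3","FINLGLVWDB_DV3","NRTNCRVWDB_DV3","slsordvwdb_dv3"]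
  let tag : List String := []
  let tag := if t == 1 then ts1_tags else tag
  let tag := if t == 3 then ts3_tags else tag
  let tag := if t == 2 then dv3_tags else tag
  -- for ind, i in enumerate(db_tags): str = s.replace(db_tags[ind], tag[ind]); s = str  -- return str = final s.
  -- tag[ind] raises IndexError in Python when t ∉ {1,2,3}: those inputs are excluded by Pre_func.
  List.foldl (fun cur (p : Int × String) =>
      PySem.Str.replace cur ((PySem.List.pyGet? db_tags p.1).getD "") ((PySem.List.pyGet? tag p.1).getD ""))
    s (PySem.List.enumerate db_tags)

-- ===== PORT B =====

-- pattern.sub with an ordered alternation of the re.escape'd literal db_tags = one left-to-right scan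
-- that at each position tries the patterns in list order, emits mapping[match] and continues after the
-- match, else copies the character. Exact for this pattern set (nonempty literal alternatives, no groups).
def pvSub (db : List (List Char)) (mp : PySem.Dict (List Char) (List Char)) : List Char → List Char
  | [] => []
  | c :: cs =>
    match db.find? (fun d => d.isPrefixOf (c :: cs)) with
    | some d => mp.getD d [] ++ pvSub db mp (cs.drop (d.length - 1))
    | none => c :: pvSub db mp cs
termination_by cs => cs.length
decreasing_by all_goals (simp; try omega)

def func_alt (s : String) (t : Int) : String :=
  let db_tags : List String := ["$$SLSORDVWDB", "$$STGDB", "$$COMREFVWDB", "$$ETLVWDB", "$$SLSORDDB", "$$ETLONLYDB","$$COMREFDB","$$WORKDB","$$EXCEPDB","$$FINLGLVWDB","$$NRTNCRVWDB","$$slsordvwdb"]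
  let envs : PySem.Dict Int String := PySem.Dict.ofList [(1, "TS1"), (2, "DV3"), (3, "TS3")]
  let tags : List (List Char) :=
    if envs.contains t then
      db_tags.map (fun name =>
        let e : List Char := (envs.getD t "").toList
        -- name[2:] + "_" + (envs[t] if name[2].isupper() else envs[t].lower())
        name.toList.drop 2 ++ '_' ::
          (if PySem.Chars.isupper ((PySem.List.pyGet? name.toList 2).getD ' ') then e else PySem.Chars.lower e))
    else []
  -- {db_tags[i]: tags[i] for i in range(len(db_tags))}; tags[i] raises IndexError when t ∉ {1,2,3} (excluded by Pre_func)
  let mapping : PySem.Dict (List Char) (List Char) :=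
    (List.range db_tags.length).foldl
      (fun d i => d.insert ((db_tags.map String.toList).getD i []) (tags.getD i [])) PySem.Dict.empty
  String.ofList (pvSub (db_tags.map String.toList) mapping s.toList)

-- ===== PRECONDITION & SPEC =====
-- Pre_func excludes exactly the inputs where A raises IndexError (tag[ind] with tag = [] for t ∉ {1,2,3}).
def Pre_func (s : String) (t : Int) : Prop := t = 1 ∨ t = 2 ∨ t = 3
instance (s : String) (t : Int) : Decidable (Pre_func s t) := by unfold Pre_func; infer_instance
def pvWitness_func : String × Int := ("use $$STGDB.tbl and $$WORKDB now", 1)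

def Spec_func (s : String) (t : Int) (out : String) : Prop := out = func_alt s t
instance (s : String) (t : Int) (out : String) : Decidable (Spec_func s t out) := by unfold Spec_func; infer_instance

-- ===== CLAIM (what is proved, stated in full; the proofs are below) =====
def Claim_equal_func : Prop := ∀ (s : String) (t : Int), Dom_func s t → Pre_func s t → Spec_func s t (func s t)

-- ===== LEMMAS AND PROOFS =====

-- a decidable "mismatch within both lengths" test: it rules out prefixhood under any continuation
def pvMm (x v : List Char) : Bool := (List.range (min x.length v.length)).any (fun k => x[k]? != v[k]?)

theorem pvMm_spec {x v : List Char} (h : pvMm x v = true) :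
    ∃ k, k < x.length ∧ k < v.length ∧ x[k]? ≠ v[k]? := by
  simp only [pvMm, List.any_eq_true, List.mem_range] at h
  obtain ⟨k, hk, hne⟩ := h
  exact ⟨k, lt_of_lt_of_le hk (min_le_left _ _), lt_of_lt_of_le hk (min_le_right _ _),
    by simpa using hne⟩

theorem pvMm_not_prefix {x v : List Char} (h : pvMm x v = true) (u : List Char) :
    ¬ x <+: (v ++ u) := by
  obtain ⟨k, hkx, hkv, hne⟩ := pvMm_spec h
  rintro ⟨t, ht⟩
  apply hne
  have h1 : (x ++ t)[k]? = x[k]? := List.getElem?_append_left hkx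
  have h2 : (v ++ u)[k]? = v[k]? := List.getElem?_append_left hkv
  rw [← h1, ht, h2]

theorem pvMm_not_prefix_rev {x v : List Char} (h : pvMm v x = true) (u : List Char) :
    ¬ x <+: (v ++ u) := by
  obtain ⟨k, hkv, hkx, hne⟩ := pvMm_spec h
  rintro ⟨t, ht⟩
  apply hne
  have h1 : (x ++ t)[k]? = x[k]? := List.getElem?_append_left hkx
  have h2 : (v ++ u)[k]? = v[k]? := List.getElem?_append_left hkv
  rw [← h2, ← ht, h1]

-- all the structure the equivalence proof needs from a replacement table (decided by `decide` per table)
def pvGood (ps : List (List Char × List Char)) : Prop :=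
  (ps.map Prod.fst).Nodup ∧
  (∀ p ∈ ps, 2 ≤ p.1.length) ∧
  (∀ p ∈ ps, ∀ q ∈ ps, p.1 ≠ q.1 → pvMm p.1 q.1 = true) ∧
  (∀ p ∈ ps, ∀ q ∈ ps, ∀ k ∈ List.range p.1.length, 1 ≤ k → pvMm (p.1.drop k) q.1 = true) ∧
  (∀ p ∈ ps, ∀ q ∈ ps, ∀ k ∈ List.range p.2.length, pvMm q.1 (p.2.drop k) = true) ∧
  (∀ p ∈ ps, ∀ q ∈ ps, p.1 ≠ q.1 → ∀ k ∈ List.range p.1.length, 1 ≤ k → pvMm (p.1.drop k) q.2 = true)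

-- ---- recursion equations for PySem.Chars.replace ----

theorem pvGo_zero (old new l acc : List Char) :
    PySem.Chars.replace.go old new 0 l acc = acc.reverse ++ l := rfl

theorem pvGo_succ_nil (old new acc : List Char) (n : ℕ) :
    PySem.Chars.replace.go old new (n+1) [] acc = acc.reverse := rfl

theorem pvGo_succ_cons (old new : List Char) (c : Char) (t acc : List Char) (n : ℕ) :
    PySem.Chars.replace.go old new (n+1) (c :: t) acc =
      if old.isPrefixOf (c :: t) then
        PySem.Chars.replace.go old new n (List.drop old.length (c :: t)) (new.reverse ++ acc)
      else PySem.Chars.replace.go old new n t (c :: acc) := rfl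

theorem pvGo_acc (old new : List Char) :
    ∀ (fuel : ℕ) (l acc : List Char),
      PySem.Chars.replace.go old new fuel l acc = acc.reverse ++ PySem.Chars.replace.go old new fuel l [] := by
  intro fuel
  induction fuel with
  | zero => intro l acc; simp [pvGo_zero]
  | succ n ih =>
    intro l acc
    cases l with
    | nil => simp [pvGo_succ_nil]
    | cons c t =>
      rw [pvGo_succ_cons, pvGo_succ_cons]
      by_cases h : old.isPrefixOf (c :: t)
      · rw [if_pos h, if_pos h, ih _ (new.reverse ++ acc), ih _ (new.reverse ++ [])]
        simp
      · rw [if_neg h, if_neg h, ih _ (c :: acc), ih _ [c]]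
        simp

theorem pvGo_fuel (old new : List Char) (hold : old ≠ []) :
    ∀ (fuel : ℕ) (l : List Char), l.length ≤ fuel →
      PySem.Chars.replace.go old new fuel l [] = PySem.Chars.replace.go old new l.length l [] := by
  intro fuel
  induction fuel using Nat.strong_induction_on with
  | _ fuel ih =>
    intro l hl
    match fuel, l with
    | 0, l =>
      have : l = [] := by cases l with
        | nil => rfl
        | cons c t => simp at hl
      subst this; rfl
    | Nat.succ n, [] => simp [pvGo_succ_nil, pvGo_zero]
    | Nat.succ n, c :: t =>
      have holdlen : 1 ≤ old.length := by
        cases old with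
        | nil => exact absurd rfl hold
        | cons a b => simp
      have hlen : t.length + 1 ≤ n + 1 := by simpa using hl
      have hcons : (c :: t).length = t.length + 1 := by simp
      rw [hcons, pvGo_succ_cons, pvGo_succ_cons]
      by_cases h : old.isPrefixOf (c :: t)
      · rw [if_pos h, if_pos h]
        rw [pvGo_acc, pvGo_acc old new t.length]
        have hdl : (List.drop old.length (c :: t)).length ≤ n := by
          simp only [List.length_drop, List.length_cons]; omega
        have hdl2 : (List.drop old.length (c :: t)).length ≤ t.length := by
          simp only [List.length_drop, List.length_cons]; omega
        rw [ih n (by omega) _ hdl, ih t.length (by omega) _ hdl2]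
      · rw [if_neg h, if_neg h]
        rw [pvGo_acc, pvGo_acc old new t.length]
        rw [ih n (by omega) t (by omega), ih t.length (by omega) t (by omega)]

theorem pvReplace_eq_go (l old new : List Char) (hold : old ≠ []) :
    PySem.Chars.replace l old new = PySem.Chars.replace.go old new l.length l [] := by
  rw [PySem.Chars.replace]
  simp [List.isEmpty_iff, hold]

theorem pvReplace_nil (old new : List Char) (hold : old ≠ []) :
    PySem.Chars.replace [] old new = [] := by
  rw [pvReplace_eq_go _ _ _ hold]; rfl

theorem pvReplace_cons_neg {old : List Char} (new : List Char) {c : Char} {t : List Char}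
    (hold : old ≠ []) (h : ¬ old <+: (c :: t)) :
    PySem.Chars.replace (c :: t) old new = c :: PySem.Chars.replace t old new := by
  rw [pvReplace_eq_go _ _ _ hold, pvReplace_eq_go _ _ _ hold]
  have hb : ¬ old.isPrefixOf (c :: t) = true := by
    intro hc
    exact h (List.isPrefixOf_iff_prefix.mp hc)
  have hcons : (c :: t).length = t.length + 1 := by simp
  rw [hcons, pvGo_succ_cons, if_neg hb, pvGo_acc]
  rfl

theorem pvReplace_pos {old : List Char} (new rest : List Char) (hold : old ≠ []) :
    PySem.Chars.replace (old ++ rest) old new = new ++ PySem.Chars.replace rest old new := by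
  cases old with
  | nil => exact absurd rfl hold
  | cons a o =>
    rw [pvReplace_eq_go _ _ _ hold, pvReplace_eq_go _ _ _ hold]
    have hpre : (a :: o).isPrefixOf ((a :: o) ++ rest) = true :=
      List.isPrefixOf_iff_prefix.mpr ⟨rest, rfl⟩
    have hlen : ((a :: o) ++ rest).length = (o.length + rest.length) + 1 := by simp
    have hshape : (a :: o) ++ rest = a :: (o ++ rest) := by simp
    rw [hlen, hshape, pvGo_succ_cons]
    rw [show a :: (o ++ rest) = (a :: o) ++ rest from rfl, if_pos (by simpa [hshape] using hpre)]
    have hdrop : List.drop (a :: o).length ((a :: o) ++ rest) = rest := by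
      simp
    rw [hdrop, pvGo_acc]
    rw [pvGo_fuel (a :: o) new hold (o.length + rest.length) rest (by omega)]
    simp

-- replace skips over a block z in which (at every offset, under any continuation) old cannot match
theorem pvReplace_skip {old : List Char} (new : List Char) (hold : old ≠ []) :
    ∀ (z v : List Char), (∀ k u, k < z.length → ¬ old <+: (z.drop k ++ u)) →
      PySem.Chars.replace (z ++ v) old new = z ++ PySem.Chars.replace v old new := by
  intro z
  induction z with
  | nil => intro v _; rfl
  | cons c z' ih =>
    intro v h
    have h0 : ¬ old <+: (c :: (z' ++ v)) := by
      have := h 0 v (by simp)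
      simpa using this
    rw [List.cons_append, pvReplace_cons_neg new hold h0, ih v (fun k u hk => by
      have := h (k + 1) u (by simp; omega)
      simpa using this)]
    simp

-- ---- the canonical "replace the tokens whose pattern is in qs" pass ----

def pvRepTo (ps qs : List (List Char × List Char)) : List Char → List Char
  | [] => []
  | c :: cs =>
    match ps.find? (fun p => p.1.isPrefixOf (c :: cs)) with
    | some p => (if (qs.map Prod.fst).contains p.1 then p.2 else p.1) ++ pvRepTo ps qs (cs.drop (p.1.length - 1))
    | none => c :: pvRepTo ps qs cs
termination_by cs => cs.length
decreasing_by all_goals (simp; try omega)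

theorem pvFind_decomp {ps : List (List Char × List Char)} {c : Char} {cs : List Char}
    {pr : List Char × List Char}
    (h : ps.find? (fun q => q.1.isPrefixOf (c :: cs)) = some pr) (hlen : 1 ≤ pr.1.length) :
    pr ∈ ps ∧ c :: cs = pr.1 ++ cs.drop (pr.1.length - 1) := by
  refine ⟨List.mem_of_find?_eq_some h, ?_⟩
  have hb := List.find?_some h
  have hpre : pr.1 <+: (c :: cs) := List.isPrefixOf_iff_prefix.mp hb
  obtain ⟨t, ht⟩ := hpre
  have htl : t = List.drop pr.1.length (c :: cs) := by
    rw [← ht]; simp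
  have hstep : List.drop pr.1.length (c :: cs) = List.drop (pr.1.length - 1) cs := by
    have h1 : pr.1.length = (pr.1.length - 1) + 1 := by omega
    conv_lhs => rw [h1]
    rw [List.drop_succ_cons]
  rw [← ht, htl, hstep]

theorem pvRepTo_nil_eq (ps qs : List (List Char × List Char)) : pvRepTo ps qs [] = [] := by
  rw [pvRepTo]

theorem pvRepTo_cons_some {ps : List (List Char × List Char)} {c : Char} {cs : List Char}
    {pr : List Char × List Char} (qs : List (List Char × List Char))
    (h : ps.find? (fun q => q.1.isPrefixOf (c :: cs)) = some pr) :
    pvRepTo ps qs (c :: cs) =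
      (if (qs.map Prod.fst).contains pr.1 then pr.2 else pr.1) ++ pvRepTo ps qs (cs.drop (pr.1.length - 1)) := by
  rw [pvRepTo, h]

theorem pvRepTo_cons_none {ps : List (List Char × List Char)} {c : Char} {cs : List Char}
    (qs : List (List Char × List Char))
    (h : ps.find? (fun q => q.1.isPrefixOf (c :: cs)) = none) :
    pvRepTo ps qs (c :: cs) = c :: pvRepTo ps qs cs := by
  rw [pvRepTo, h]

theorem pvSub_nil (db : List (List Char)) (mp : PySem.Dict (List Char) (List Char)) :
    pvSub db mp [] = [] := by
  rw [pvSub]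

theorem pvSub_cons_some {db : List (List Char)} {c : Char} {cs : List Char} {d : List Char}
    (mp : PySem.Dict (List Char) (List Char))
    (h : db.find? (fun d => d.isPrefixOf (c :: cs)) = some d) :
    pvSub db mp (c :: cs) = mp.getD d [] ++ pvSub db mp (cs.drop (d.length - 1)) := by
  rw [pvSub, h]

theorem pvSub_cons_none {db : List (List Char)} {c : Char} {cs : List Char}
    (mp : PySem.Dict (List Char) (List Char))
    (h : db.find? (fun d => d.isPrefixOf (c :: cs)) = none) :
    pvSub db mp (c :: cs) = c :: pvSub db mp cs := by
  rw [pvSub, h]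

-- the structural conditions, projected out with names
theorem pvGood_len {ps : List (List Char × List Char)} (hg : pvGood ps)
    {p : List Char × List Char} (hp : p ∈ ps) : 2 ≤ p.1.length := hg.2.1 p hp

theorem pvGood_ne {ps : List (List Char × List Char)} (hg : pvGood ps)
    {p q : List Char × List Char} (hp : p ∈ ps) (hq : q ∈ ps) (h : p.1 ≠ q.1) :
    pvMm p.1 q.1 = true := hg.2.2.1 p hp q hq h

theorem pvGood_dropx {ps : List (List Char × List Char)} (hg : pvGood ps)
    {p q : List Char × List Char} (hp : p ∈ ps) (hq : q ∈ ps) {k : ℕ}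
    (h1 : 1 ≤ k) (h2 : k < p.1.length) : pvMm (p.1.drop k) q.1 = true :=
  hg.2.2.2.1 p hp q hq k (List.mem_range.mpr h2) h1

theorem pvGood_dropy {ps : List (List Char × List Char)} (hg : pvGood ps)
    {p q : List Char × List Char} (hp : p ∈ ps) (hq : q ∈ ps) {k : ℕ}
    (h2 : k < p.2.length) : pvMm q.1 (p.2.drop k) = true :=
  hg.2.2.2.2.1 p hp q hq k (List.mem_range.mpr h2)

theorem pvGood_dropxy {ps : List (List Char × List Char)} (hg : pvGood ps)
    {p q : List Char × List Char} (hp : p ∈ ps) (hq : q ∈ ps) (hne : p.1 ≠ q.1) {k : ℕ}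
    (h1 : 1 ≤ k) (h2 : k < p.1.length) : pvMm (p.1.drop k) q.2 = true :=
  hg.2.2.2.2.2 p hp q hq hne k (List.mem_range.mpr h2) h1

theorem pvRepTo_nil_qs {ps : List (List Char × List Char)} (hg : pvGood ps) :
    ∀ cs, pvRepTo ps [] cs = cs := by
  suffices H : ∀ n cs, cs.length ≤ n → pvRepTo ps [] cs = cs from fun cs => H cs.length cs le_rfl
  intro n
  induction n with
  | zero =>
    intro cs h
    have : cs = [] := by cases cs with
      | nil => rfl
      | cons c t => simp at h
    subst this; exact pvRepTo_nil_eq ps []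
  | succ n ih =>
    intro cs h
    cases cs with
    | nil => exact pvRepTo_nil_eq ps []
    | cons c cs' =>
      cases hf : ps.find? (fun q => q.1.isPrefixOf (c :: cs')) with
      | none =>
        rw [pvRepTo_cons_none [] hf, ih cs' (by simp at h; omega)]
      | some pr =>
        have hpm := List.mem_of_find?_eq_some hf
        have hlen2 := pvGood_len hg hpm
        obtain ⟨_, hdecomp⟩ := pvFind_decomp hf (by omega)
        rw [pvRepTo_cons_some [] hf]
        simp only [List.map_nil, List.contains_nil, if_neg Bool.false_ne_true]
        rw [ih _ (by simp at h ⊢; omega)]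
        exact hdecomp.symm

theorem pvQ {ps qs : List (List Char × List Char)} (hg : pvGood ps)
    {xn yn : List Char} (hmem : (xn, yn) ∈ ps) (hqs : xn ∉ qs.map Prod.fst) :
    ∀ (v : List Char) (k : ℕ), 1 ≤ k → k < xn.length →
      ¬ (xn.drop k <+: v) → ¬ (xn.drop k <+: pvRepTo ps qs v) := by
  suffices H : ∀ n v k, v.length ≤ n → 1 ≤ k → k < xn.length →
      ¬ (xn.drop k <+: v) → ¬ (xn.drop k <+: pvRepTo ps qs v) from
    fun v k h1 h2 h3 => H v.length v k le_rfl h1 h2 h3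
  intro n
  induction n with
  | zero =>
    intro v k hv h1 h2 h3
    have : v = [] := by cases v with
      | nil => rfl
      | cons c t => simp at hv
    subst this
    rw [pvRepTo_nil_eq]
    exact h3
  | succ n ih =>
    intro v k hv h1 h2 h3
    cases v with
    | nil => rw [pvRepTo_nil_eq]; exact h3
    | cons c u =>
      cases hf : ps.find? (fun q => q.1.isPrefixOf (c :: u)) with
      | some pr =>
        have hpm := List.mem_of_find?_eq_some hf
        rw [pvRepTo_cons_some qs hf]
        by_cases hcont : (qs.map Prod.fst).contains pr.1
        · rw [if_pos hcont]
          have hne : xn ≠ pr.1 := by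
            intro he; rw [he] at hqs
            exact hqs (by simpa using hcont)
          exact pvMm_not_prefix (pvGood_dropxy hg hmem hpm (by exact hne) h1 h2) _
        · rw [if_neg hcont]
          exact pvMm_not_prefix (pvGood_dropx hg hmem hpm h1 h2) _
      | none =>
        rw [pvRepTo_cons_none qs hf]
        intro hpre
        have hd : xn.drop k = xn[k] :: xn.drop (k + 1) := List.drop_eq_getElem_cons h2
        rw [hd, List.cons_prefix_cons] at hpre
        obtain ⟨hc, htail⟩ := hpre
        by_cases hk2 : k + 1 < xn.length
        · have hnot : ¬ (xn.drop (k + 1) <+: u) := by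
            intro hu
            apply h3
            rw [hd, List.cons_prefix_cons]
            exact ⟨hc, hu⟩
          exact ih u (k + 1) (by simp at hv; omega) (by omega) hk2 hnot htail
        · have hkl : k + 1 = xn.length := by omega
          have hde : xn.drop (k + 1) = [] := by
            rw [List.drop_eq_nil_iff]; omega
          apply h3
          rw [hd, hde, List.cons_prefix_cons]
          exact ⟨hc, List.nil_prefix⟩

theorem pvStep {ps qs : List (List Char × List Char)} (hg : pvGood ps)
    {pn : List Char × List Char} (hmem : pn ∈ ps) (hqs : pn.1 ∉ qs.map Prod.fst) :
    ∀ cs, PySem.Chars.replace (pvRepTo ps qs cs) pn.1 pn.2 = pvRepTo ps (qs ++ [pn]) cs := by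
  have hlenn := pvGood_len hg hmem
  have hne0 : pn.1 ≠ [] := by
    intro he; rw [he] at hlenn; simp at hlenn
  suffices H : ∀ n cs, cs.length ≤ n →
      PySem.Chars.replace (pvRepTo ps qs cs) pn.1 pn.2 = pvRepTo ps (qs ++ [pn]) cs from
    fun cs => H cs.length cs le_rfl
  intro n
  induction n with
  | zero =>
    intro cs h
    have : cs = [] := by cases cs with
      | nil => rfl
      | cons c t => simp at h
    subst this
    rw [pvRepTo_nil_eq, pvRepTo_nil_eq]
    exact pvReplace_nil _ _ hne0
  | succ n ih =>
    intro cs h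
    cases cs with
    | nil =>
      rw [pvRepTo_nil_eq, pvRepTo_nil_eq]
      exact pvReplace_nil _ _ hne0
    | cons c u =>
      cases hf : ps.find? (fun q => q.1.isPrefixOf (c :: u)) with
      | some pr =>
        have hpm := List.mem_of_find?_eq_some hf
        have hplen := pvGood_len hg hpm
        have hrec : (u.drop (pr.1.length - 1)).length ≤ n := by
          simp only [List.length_drop]
          simp only [List.length_cons] at h
          omega
        rw [pvRepTo_cons_some qs hf, pvRepTo_cons_some (qs ++ [pn]) hf]
        by_cases hcont : (qs.map Prod.fst).contains pr.1
        · rw [if_pos hcont]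
          have hcont2 : ((qs ++ [pn]).map Prod.fst).contains pr.1 := by
            simp only [List.map_append, List.contains_append, hcont, Bool.true_or]
          rw [if_pos hcont2]
          rw [pvReplace_skip pn.2 hne0 pr.2 _ (fun k w hk =>
            pvMm_not_prefix (pvGood_dropy hg hpm hmem hk) w)]
          rw [ih _ hrec]
        · by_cases hx : pr.1 = pn.1
          · have hpr : pr = pn :=
              List.inj_on_of_nodup_map hg.1 hpm hmem hx
            subst hpr
            rw [if_neg hcont]
            have hcont2 : ((qs ++ [pr]).map Prod.fst).contains pr.1 := by
              simp
            rw [if_pos hcont2]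
            rw [pvReplace_pos _ _ hne0, ih _ hrec]
          · rw [if_neg hcont]
            have hcont2 : ¬ ((qs ++ [pn]).map Prod.fst).contains pr.1 := by
              simp only [List.map_append, List.contains_append, Bool.or_eq_true]
              rintro (hin | hin)
              · exact hcont hin
              · simp at hin; exact hx hin
            rw [if_neg hcont2]
            rw [pvReplace_skip pn.2 hne0 pr.1 _ (fun k w hk => by
              rcases Nat.eq_zero_or_pos k with hk0 | hk1
              · subst hk0
                simp only [List.drop_zero]
                exact pvMm_not_prefix (pvGood_ne hg hmem hpm (fun he => hx he.symm)) w
              · exact pvMm_not_prefix_rev (pvGood_dropx hg hpm hmem hk1 hk) w)]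
            rw [ih _ hrec]
      | none =>
        rw [pvRepTo_cons_none qs hf, pvRepTo_cons_none (qs ++ [pn]) hf]
        have hnotpre : ¬ pn.1 <+: (c :: pvRepTo ps qs u) := by
          intro hpre
          have hd : pn.1 = pn.1[0] :: pn.1.drop 1 := by
            have := List.drop_eq_getElem_cons (l := pn.1) (i := 0) (by omega)
            simpa using this
          rw [hd, List.cons_prefix_cons] at hpre
          obtain ⟨hc, htail⟩ := hpre
          have hforig : ¬ pn.1.isPrefixOf (c :: u) = true := by
            rw [List.find?_eq_none] at hf
            exact hf pn hmem
          have hnu : ¬ (pn.1.drop 1 <+: u) := by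
            intro hu
            apply hforig
            rw [List.isPrefixOf_iff_prefix]
            conv_lhs => rw [hd]
            rw [List.cons_prefix_cons]
            exact ⟨hc, hu⟩
          exact pvQ hg (by simpa using hmem) hqs u 1 le_rfl (by omega) hnu htail
        rw [pvReplace_cons_neg _ hne0 hnotpre, ih u (by simp at h; omega)]

theorem pvFoldl_repTo {ps : List (List Char × List Char)} (hg : pvGood ps) :
    ∀ (ps2 qs : List (List Char × List Char)), qs ++ ps2 = ps →
      ∀ cs, List.foldl (fun acc p => PySem.Chars.replace acc p.1 p.2) (pvRepTo ps qs cs) ps2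
        = pvRepTo ps ps cs := by
  intro ps2
  induction ps2 with
  | nil => intro qs hqs cs; simp [← hqs]
  | cons p ps2' ih =>
    intro qs hqs cs
    have hmem : p ∈ ps := by rw [← hqs]; simp
    have hnotin : p.1 ∉ qs.map Prod.fst := by
      have hnd : (ps.map Prod.fst).Nodup := hg.1
      rw [← hqs] at hnd
      simp only [List.map_append, List.map_cons, List.nodup_append] at hnd
      intro hin
      exact hnd.2.2 p.1 hin p.1 (by simp) rfl
    simp only [List.foldl_cons]
    rw [pvStep hg hmem hnotin cs]
    exact ih (qs ++ [p]) (by simpa using hqs) cs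

theorem pvChain_eq {ps : List (List Char × List Char)} (hg : pvGood ps) (cs : List Char) :
    List.foldl (fun acc p => PySem.Chars.replace acc p.1 p.2) cs ps = pvRepTo ps ps cs := by
  have := pvFoldl_repTo hg ps [] rfl cs
  rwa [pvRepTo_nil_qs hg cs] at this

theorem pvSub_eq_repTo {ps : List (List Char × List Char)} (hg : pvGood ps)
    {db : List (List Char)} {mp : PySem.Dict (List Char) (List Char)}
    (hdb : db = ps.map Prod.fst) (hmp : ∀ p ∈ ps, mp.getD p.1 [] = p.2) :
    ∀ cs, pvSub db mp cs = pvRepTo ps ps cs := by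
  suffices H : ∀ n cs, cs.length ≤ n → pvSub db mp cs = pvRepTo ps ps cs from
    fun cs => H cs.length cs le_rfl
  intro n
  induction n with
  | zero =>
    intro cs h
    have : cs = [] := by cases cs with
      | nil => rfl
      | cons c t => simp at h
    subst this
    rw [pvSub_nil, pvRepTo_nil_eq]
  | succ n ih =>
    intro cs h
    cases cs with
    | nil => rw [pvSub_nil, pvRepTo_nil_eq]
    | cons c u =>
      have hfind : db.find? (fun d => d.isPrefixOf (c :: u)) =
          Option.map Prod.fst (ps.find? (fun q => q.1.isPrefixOf (c :: u))) := by
        rw [hdb, List.find?_map]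
        rfl
      cases hf : ps.find? (fun q => q.1.isPrefixOf (c :: u)) with
      | some pr =>
        have hpm := List.mem_of_find?_eq_some hf
        rw [pvSub_cons_some mp (by rw [hfind, hf]; rfl), pvRepTo_cons_some ps hf]
        have hcont : (ps.map Prod.fst).contains pr.1 := by
          simp only [List.contains_eq_mem, decide_eq_true_eq]
          exact List.mem_map.mpr ⟨pr, hpm, rfl⟩
        rw [if_pos hcont, hmp pr hpm]
        congr 1
        apply ih
        simp only [List.length_drop]
        simp only [List.length_cons] at h
        omega
      | none =>
        rw [pvSub_cons_none mp (by rw [hfind, hf]; rfl), pvRepTo_cons_none ps hf,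
          ih u (by simp at h; omega)]

-- ---- the three concrete tables ----

def pvPs1 : List (List Char × List Char) :=
  (["$$SLSORDVWDB", "$$STGDB", "$$COMREFVWDB", "$$ETLVWDB", "$$SLSORDDB", "$$ETLONLYDB","$$COMREFDB","$$WORKDB","$$EXCEPDB","$$FINLGLVWDB","$$NRTNCRVWDB","$$slsordvwdb"].map String.toList).zip
  (["SLSORDVWDB_TS1", "STGDB_TS1", "COMREFVWDB_TS1", "ETLVWDB_TS1", "SLSORDDB_TS1", "ETLONLYDB_TS1","COMREFDB_TS1","WORKDB_TS1","EXCEPDB_TS1","FINLGLVWDB_TS1","NRTNCRVWDB_TS1","slsordvwdb_ts1"].map String.toList)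

def pvPs3 : List (List Char × List Char) :=
  (["$$SLSORDVWDB", "$$STGDB", "$$COMREFVWDB", "$$ETLVWDB", "$$SLSORDDB", "$$ETLONLYDB","$$COMREFDB","$$WORKDB","$$EXCEPDB","$$FINLGLVWDB","$$NRTNCRVWDB","$$slsordvwdb"].map String.toList).zip
  (["SLSORDVWDB_TS3", "STGDB_TS3", "COMREFVWDB_TS3", "ETLVWDB_TS3", "SLSORDDB_TS3", "ETLONLYDB_TS3","COMREFDB_TS3","WORKDB_TS3","EXCEPDB_TS3","FINLGLVWDB_TS3","NRTNCRVWDB_TS3","slsordvwdb_ts3"].map String.toList)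

def pvPs2 : List (List Char × List Char) :=
  (["$$SLSORDVWDB", "$$STGDB", "$$COMREFVWDB", "$$ETLVWDB", "$$SLSORDDB", "$$ETLONLYDB","$$COMREFDB","$$WORKDB","$$EXCEPDB","$$FINLGLVWDB","$$NRTNCRVWDB","$$slsordvwdb"].map String.toList).zip
  (["SLSORDVWDB_DV3", "STGDB_DV3", "COMREFVWDB_DV3", "ETLVWDB_DV3", "SLSORDDB_DV3", "ETLONLYDB_DV3","COMREFDB_DV3","WORKDB_DV3","EXCEPDB_DV3","FINLGLVWDB_DV3","NRTNCRVWDB_DV3","slsordvwdb_dv3"].map String.toList)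

theorem pvGood1 : pvGood pvPs1 := by unfold pvGood; decide
theorem pvGood3 : pvGood pvPs3 := by unfold pvGood; decide
theorem pvGood2 : pvGood pvPs2 := by unfold pvGood; decide

theorem pvMpSpec1 : ∀ p ∈ pvPs1, (PySem.Dict.ofList pvPs1).getD p.1 [] = p.2 := by decide
theorem pvMpSpec3 : ∀ p ∈ pvPs3, (PySem.Dict.ofList pvPs3).getD p.1 [] = p.2 := by decide
theorem pvMpSpec2 : ∀ p ∈ pvPs2, (PySem.Dict.ofList pvPs2).getD p.1 [] = p.2 := by decide

set_option maxRecDepth 8000 in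
theorem pvFuncA1 (s : String) : func s 1 =
    String.ofList (List.foldl (fun acc p => PySem.Chars.replace acc p.1 p.2) s.toList pvPs1) := by
  simp only [func, pvPs1]
  simp only [PySem.List.enumerate, PySem.List.pyGet?, PySem.Str.replace, String.toList_ofList,
    List.foldl, List.map, List.zip, List.zipWith]
  rfl

set_option maxRecDepth 8000 in
theorem pvFuncA3 (s : String) : func s 3 =
    String.ofList (List.foldl (fun acc p => PySem.Chars.replace acc p.1 p.2) s.toList pvPs3) := by
  simp only [func, pvPs3]
  simp only [PySem.List.enumerate, PySem.List.pyGet?, PySem.Str.replace, String.toList_ofList,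
    List.foldl, List.map, List.zip, List.zipWith]
  rfl

set_option maxRecDepth 8000 in
theorem pvFuncA2 (s : String) : func s 2 =
    String.ofList (List.foldl (fun acc p => PySem.Chars.replace acc p.1 p.2) s.toList pvPs2) := by
  simp only [func, pvPs2]
  simp only [PySem.List.enumerate, PySem.List.pyGet?, PySem.Str.replace, String.toList_ofList,
    List.foldl, List.map, List.zip, List.zipWith]
  rfl

set_option maxRecDepth 8000 in
theorem pvFuncB1 (s : String) : func_alt s 1 =
    String.ofList (pvSub (pvPs1.map Prod.fst) (PySem.Dict.ofList pvPs1) s.toList) := by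
  simp only [func_alt, pvPs1]
  rfl

set_option maxRecDepth 8000 in
theorem pvFuncB3 (s : String) : func_alt s 3 =
    String.ofList (pvSub (pvPs3.map Prod.fst) (PySem.Dict.ofList pvPs3) s.toList) := by
  simp only [func_alt, pvPs3]
  rfl

set_option maxRecDepth 8000 in
theorem pvFuncB2 (s : String) : func_alt s 2 =
    String.ofList (pvSub (pvPs2.map Prod.fst) (PySem.Dict.ofList pvPs2) s.toList) := by
  simp only [func_alt, pvPs2]
  rfl

-- ===== VERDICT (by name: the statement is the Claim_ definition above) =====
theorem func_spec : Claim_equal_func := by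
  intro s t _ hpre
  unfold Spec_func
  rcases hpre with h | h | h <;> subst h
  · rw [pvFuncA1, pvFuncB1, pvChain_eq pvGood1, pvSub_eq_repTo pvGood1 rfl pvMpSpec1]
  · rw [pvFuncA2, pvFuncB2, pvChain_eq pvGood2, pvSub_eq_repTo pvGood2 rfl pvMpSpec2]
  · rw [pvFuncA3, pvFuncB3, pvChain_eq pvGood3, pvSub_eq_repTo pvGood3 rfl pvMpSpec3]
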